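-- pv_equiv track=rewrite | github.com/noxknow/Python-Coding_test | Programmers 코딩 테스트/2018 카카오 블라인드, 인턴쉽/2018 카카오 블라인드 방금그곡.py | solution
-- ===== SOURCE A (Python) =====
-- def change(music):
--     if "A#" in music:
--         music = music.replace("A#", "a")
--     if "F#" in music:
--         music = music.replace("F#", "f")
--     if "D#" in music:
--         music = music.replace("D#", "d")
--     if "C#" in music:
--         music = music.replace("C#", "c")
--     if "G#" in music:
--         music = music.replace("G#", "g")
--     return music
--
-- def solution(m, musicinfos):
--     answer = []
--     index = 0
--
--     for info in musicinfos:
--         index += 1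
--         music = info.split(",")
--         start = music[0].split(":")
--         end = music[1].split(":")
--         time = (int(end[0]) * 60 + int(end[1])) - (int(start[0]) * 60 + int(start[1])) # 시간 계산 중요
--
--         changed = change(music[3])
--         a = len(changed) # 그냥 길이 구하면 # 길이 때문에 이상해지니 소문자로 바꾸기
--         b = changed * (time//a) + changed[:time%a] # 이런 생각..
--         m = change(m)
--
--         if m in b:
--             answer.append([time, index, music[2]])
--
--     answer.sort(key = lambda x: (-x[0], x[1]))
--
--     if answer:
--         return answer[0][2]
--     else:
--         return "(None)"
-- ===== SOURCE B (Python) =====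
-- def solution(m, musicinfos):
--     def normalize(s):
--         for sharp, flat in (("A#", "a"), ("F#", "f"), ("D#", "d"), ("C#", "c"), ("G#", "g")):
--             s = s.replace(sharp, flat)
--         return s
--
--     key = normalize(m)
--     best = None  # (duration, title) of the best match so far
--     for info in musicinfos:
--         parts = info.split(",")
--         sh, sm = parts[0].split(":")[:2]
--         eh, em = parts[1].split(":")[:2]
--         dur = (int(eh) - int(sh)) * 60 + int(em) - int(sm)
--         sheet = normalize(parts[3])
--         played = sheet * (dur // len(sheet)) + sheet[:dur % len(sheet)]
--         if key in played and (best is None or dur > best[0]):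
--             best = (dur, parts[2])
--     return best[1] if best is not None else "(None)"
-- ===== Notes on version B (the rewrite author's own statement) =====
-- stated objective: simpler
-- what changed: B replaces A's build-a-list-of-[time,index,title]-then-sort-by-(-time,index)-and-take-first with a single pass that keeps only the best (duration, title) so far (strict > preserves the earliest-match tie-break), and normalizes the query melody once before the loop instead of re-normalizing it on every record.
import Mathlib
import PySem

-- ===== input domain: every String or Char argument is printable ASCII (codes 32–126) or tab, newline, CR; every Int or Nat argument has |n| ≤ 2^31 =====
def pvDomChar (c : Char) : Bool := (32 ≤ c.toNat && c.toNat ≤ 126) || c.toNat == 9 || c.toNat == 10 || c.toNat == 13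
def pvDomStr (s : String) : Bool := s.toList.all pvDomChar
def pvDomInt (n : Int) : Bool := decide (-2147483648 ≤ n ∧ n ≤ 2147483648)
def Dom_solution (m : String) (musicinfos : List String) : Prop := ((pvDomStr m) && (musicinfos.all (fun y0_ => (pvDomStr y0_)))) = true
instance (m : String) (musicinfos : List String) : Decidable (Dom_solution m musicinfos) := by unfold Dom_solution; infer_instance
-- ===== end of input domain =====

-- B replaces A's build-a-list-then-sort-by-(-time,index) with a single pass keeping the best
-- (duration, title) so far, and normalizes the query melody once instead of once per record (objective: simpler).

-- ===== PORT A =====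

-- helper `change` of A: five guarded replaces
def changeStr (music : String) : String :=
  let music := if PySem.Str.isIn "A#" music then PySem.Str.replace music "A#" "a" else music
  let music := if PySem.Str.isIn "F#" music then PySem.Str.replace music "F#" "f" else music
  let music := if PySem.Str.isIn "D#" music then PySem.Str.replace music "D#" "d" else music
  let music := if PySem.Str.isIn "C#" music then PySem.Str.replace music "C#" "c" else music
  let music := if PySem.Str.isIn "G#" music then PySem.Str.replace music "G#" "g" else music
  music

-- loop body of A; state = (answer, index, m)  (A reassigns m inside the loop)
def solStepA (st : List (Int × Int × String) × Int × String) (info : String) :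
    List (Int × Int × String) × Int × String :=
  let answer := st.1
  let index := st.2.1 + 1
  let music := (PySem.Str.split? info ",").getD []
  let start := (PySem.Str.split? (PySem.List.pyGetD music 0 "") ":").getD []
  let stop  := (PySem.Str.split? (PySem.List.pyGetD music 1 "") ":").getD []
  let time : Int :=
    ((PySem.Int.ofStr? (PySem.List.pyGetD stop 0 "")).getD 0 * 60
      + (PySem.Int.ofStr? (PySem.List.pyGetD stop 1 "")).getD 0)
    - ((PySem.Int.ofStr? (PySem.List.pyGetD start 0 "")).getD 0 * 60
      + (PySem.Int.ofStr? (PySem.List.pyGetD start 1 "")).getD 0)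
  let changed := changeStr (PySem.List.pyGetD music 3 "")
  let a : Int := PySem.Str.len changed
  let b : List Char :=
    PySem.List.pyRepeat changed.toList (PySem.Int.floordiv time a)
      ++ PySem.Chars.slice changed.toList none (some (PySem.Int.mod time a))
  let mc := changeStr st.2.2
  if PySem.Chars.isIn mc.toList b then
    (answer ++ [(time, index, PySem.List.pyGetD music 2 "")], index, mc)
  else
    (answer, index, mc)

def solution (m : String) (musicinfos : List String) : String :=
  let st := musicinfos.foldl solStepA ([], 0, m)
  match PySem.List.sorted2 st.1 (fun x => -x.1) (fun x => x.2.1) false with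
  | [] => "(None)"
  | e :: _ => e.2.2

-- ===== PORT B =====

-- helper `normalize` of B: fold the sharp→flat table over the string
def normStr (s : String) : String :=
  [("A#", "a"), ("F#", "f"), ("D#", "d"), ("C#", "c"), ("G#", "g")].foldl
    (fun acc (p : String × String) => PySem.Str.replace acc p.1 p.2) s

-- loop body of B; state = best match so far as Option (duration, title)
def solStepB (key : String) (best : Option (Int × String)) (info : String) :
    Option (Int × String) :=
  let parts := (PySem.Str.split? info ",").getD []
  let stp := PySem.List.slice ((PySem.Str.split? (PySem.List.pyGetD parts 0 "") ":").getD []) none (some 2)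
  let enp := PySem.List.slice ((PySem.Str.split? (PySem.List.pyGetD parts 1 "") ":").getD []) none (some 2)
  let sh := (PySem.Int.ofStr? (stp.getD 0 "")).getD 0
  let sm := (PySem.Int.ofStr? (stp.getD 1 "")).getD 0
  let eh := (PySem.Int.ofStr? (enp.getD 0 "")).getD 0
  let em := (PySem.Int.ofStr? (enp.getD 1 "")).getD 0
  let dur : Int := (eh - sh) * 60 + em - sm
  let sheet := normStr (PySem.List.pyGetD parts 3 "")
  let played : List Char :=
    PySem.List.pyRepeat sheet.toList (PySem.Int.floordiv dur (PySem.Str.len sheet))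
      ++ PySem.Chars.slice sheet.toList none (some (PySem.Int.mod dur (PySem.Str.len sheet)))
  match best with
  | none => if PySem.Chars.isIn key.toList played then some (dur, PySem.List.pyGetD parts 2 "") else none
  | some b =>
      if PySem.Chars.isIn key.toList played && decide (b.1 < dur) then
        some (dur, PySem.List.pyGetD parts 2 "")
      else some b

def solution_alt (m : String) (musicinfos : List String) : String :=
  let key := normStr m
  match musicinfos.foldl (solStepB key) none with
  | some b => b.2
  | none => "(None)"

-- ===== PRECONDITION & SPEC =====
-- Pre_ excludes exactly the inputs where the Python A raises: a record with fewer than 4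
-- comma-fields, a time field without two ':'-parts, a non-integer hour/minute (ValueError),
-- or an empty melody sheet (ZeroDivisionError).
def Pre_solution (m : String) (musicinfos : List String) : Prop :=
  ∀ info ∈ musicinfos,
    let music := (PySem.Str.split? info ",").getD []
    let start := (PySem.Str.split? (PySem.List.pyGetD music 0 "") ":").getD []
    let stop  := (PySem.Str.split? (PySem.List.pyGetD music 1 "") ":").getD []
    4 ≤ music.length ∧ 2 ≤ start.length ∧ 2 ≤ stop.length ∧
    (PySem.Int.ofStr? (PySem.List.pyGetD start 0 "")).isSome = true ∧
    (PySem.Int.ofStr? (PySem.List.pyGetD start 1 "")).isSome = true ∧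
    (PySem.Int.ofStr? (PySem.List.pyGetD stop 0 "")).isSome = true ∧
    (PySem.Int.ofStr? (PySem.List.pyGetD stop 1 "")).isSome = true ∧
    PySem.List.pyGetD music 3 "" ≠ ""

instance (m : String) (musicinfos : List String) : Decidable (Pre_solution m musicinfos) := by
  unfold Pre_solution; infer_instance

def pvWitness_solution : String × List String := ("ABC", ["12:00,12:14,HELLO,CDEFGAB"])

def Spec_solution (m : String) (musicinfos : List String) (out : String) : Prop := out = solution_alt m musicinfos
instance (m : String) (musicinfos : List String) (out : String) : Decidable (Spec_solution m musicinfos out) := by unfold Spec_solution; infer_instance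

-- ===== CLAIM (what is proved, stated in full; the proofs are below) =====
def Claim_equal_solution : Prop := ∀ (m : String) (musicinfos : List String), Dom_solution m musicinfos → Pre_solution m musicinfos → Spec_solution m musicinfos (solution m musicinfos)

-- ===== LEMMAS AND PROOFS =====

def rep2 (X x : Char) : List Char → List Char
  | [] => []
  | [c] => [c]
  | c1 :: c2 :: t => if c1 = X ∧ c2 = '#' then x :: rep2 X x t else c1 :: rep2 X x (c2 :: t)

theorem go_eq_rep2 (X x : Char) : ∀ (fuel : Nat) (l acc : List Char), l.length ≤ fuel →
    PySem.Chars.replace.go [X, '#'] [x] fuel l acc = acc.reverse ++ rep2 X x l := by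
  intro fuel
  induction fuel with
  | zero =>
    intro l acc h
    have hl : l = [] := by cases l with | nil => rfl | cons a t => simp at h
    subst hl
    simp [PySem.Chars.replace.go, rep2]
  | succ n ih =>
    intro l acc h
    match l with
    | [] => simp [PySem.Chars.replace.go, rep2]
    | [c] =>
      rw [show PySem.Chars.replace.go [X, '#'] [x] (n+1) [c] acc
            = if [X,'#'].isPrefixOf [c] then PySem.Chars.replace.go [X,'#'] [x] n (List.drop 2 [c]) ([x].reverse ++ acc)
              else PySem.Chars.replace.go [X,'#'] [x] n [] (c :: acc) from rfl]
      simp only [List.isPrefixOf, Bool.and_false, Bool.false_eq_true, if_false]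
      rw [ih [] (c :: acc) (by simp)]
      simp [rep2]
    | c1 :: c2 :: t =>
      rw [show PySem.Chars.replace.go [X, '#'] [x] (n+1) (c1 :: c2 :: t) acc
            = if [X,'#'].isPrefixOf (c1 :: c2 :: t) then PySem.Chars.replace.go [X,'#'] [x] n (List.drop 2 (c1 :: c2 :: t)) ([x].reverse ++ acc)
              else PySem.Chars.replace.go [X,'#'] [x] n (c2 :: t) (c1 :: acc) from rfl]
      by_cases hc : c1 = X ∧ c2 = '#'
      · have hpre : ([X,'#'].isPrefixOf (c1 :: c2 :: t)) = true := by
          simp [List.isPrefixOf, hc.1, hc.2]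
        rw [hpre]
        simp only [if_true, List.drop, List.reverse_singleton, List.singleton_append]
        rw [ih t (x :: acc) (by simp at h ⊢; omega)]
        simp [rep2, hc]
      · have hp : ([X,'#'].isPrefixOf (c1 :: c2 :: t)) = false := by
          have : ¬(X = c1 ∧ '#' = c2) := fun ⟨a, b⟩ => hc ⟨a.symm, b.symm⟩
          simpa [List.isPrefixOf] using this
        rw [hp]
        simp only [Bool.false_eq_true, if_false]
        rw [ih (c2 :: t) (c1 :: acc) (by simp at h ⊢; omega)]
        simp [rep2, hc]

theorem replace_eq_rep2 (X x : Char) (l : List Char) :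
    PySem.Chars.replace l [X, '#'] [x] = rep2 X x l := by
  rw [show PySem.Chars.replace l [X,'#'] [x]
        = if ([X,'#'] : List Char).isEmpty then [x] ++ List.flatMap (fun c => c :: [x]) l
          else PySem.Chars.replace.go [X,'#'] [x] l.length l [] from rfl]
  simp only [List.isEmpty, Bool.false_eq_true, if_false]
  rw [go_eq_rep2 X x l.length l [] le_rfl]
  simp

theorem singleton_prefix_iff {a : Char} {l : List Char} : [a] <+: l ↔ l.head? = some a := by
  cases l with
  | nil => simp
  | cons b t => simp [List.cons_prefix_cons, eq_comm]

theorem pat_infix_cons {Y a : Char} {r : List Char} :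
    [Y, '#'] <:+: (a :: r) ↔ (a = Y ∧ r.head? = some '#') ∨ [Y, '#'] <:+: r := by
  rw [List.infix_cons_iff, List.cons_prefix_cons, singleton_prefix_iff]
  constructor
  · rintro (⟨h1, h2⟩ | h)
    · exact Or.inl ⟨h1.symm, h2⟩
    · exact Or.inr h
  · rintro (⟨h1, h2⟩ | h)
    · exact Or.inl ⟨h1.symm, h2⟩
    · exact Or.inr h

theorem rep2_head? (X x c : Char) (t : List Char) :
    (rep2 X x (c :: t)).head? = some x ∨ (rep2 X x (c :: t)).head? = some c := by
  cases t with
  | nil => simp [rep2]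
  | cons c2 t2 =>
    by_cases hc : c = X ∧ c2 = '#'
    · simp [rep2, hc]
    · simp [rep2, hc]

theorem rep2_of_not_infix (X x : Char) (l : List Char) (h : ¬ [X, '#'] <:+: l) :
    rep2 X x l = l := by
  induction l using rep2.induct X with
  | case1 => simp [rep2]
  | case2 c => simp [rep2]
  | case3 c1 c2 t hc ih =>
    refine absurd ?_ h
    have hp : [X, '#'] <+: (c1 :: c2 :: t) := by rw [hc.1, hc.2]; exact ⟨t, rfl⟩
    exact hp.isInfix
  | case4 c1 c2 t hc ih =>
    rw [rep2, if_neg hc]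
    rw [ih (fun hi => h (pat_infix_cons.mpr (Or.inr hi)))]

theorem not_pat_infix_rep2 (X x Y : Char) (hxY : x ≠ Y) (hxh : x ≠ '#') (l : List Char)
    (h : Y = X ∨ ¬ [Y, '#'] <:+: l) : ¬ [Y, '#'] <:+: rep2 X x l := by
  induction l using rep2.induct X with
  | case1 => simp [rep2]
  | case2 c =>
    intro hi
    have := hi.length_le
    simp [rep2] at this
  | case3 c1 c2 t hc ih =>
    rw [rep2, if_pos hc]
    intro hi
    rcases pat_infix_cons.mp hi with ⟨h1, _⟩ | hi2
    · exact hxY h1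
    · refine ih ?_ hi2
      rcases h with hYX | hnf
      · exact Or.inl hYX
      · exact Or.inr fun ht => hnf (pat_infix_cons.mpr (Or.inr (pat_infix_cons.mpr (Or.inr ht))))
  | case4 c1 c2 t hc ih =>
    rw [rep2, if_neg hc]
    intro hi
    rcases pat_infix_cons.mp hi with ⟨h1, h2⟩ | hi2
    · -- head of rep2 (c2::t) is x or c2; it equals '#'
      rcases rep2_head? X x c2 t with hh | hh
      · rw [hh] at h2; exact hxh (by injection h2)
      · rw [hh] at h2
        have hc2 : c2 = '#' := by injection h2
        rcases h with hYX | hnf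
        · exact hc ⟨h1.trans hYX, hc2⟩
        · exact hnf ((List.cons_prefix_cons.mpr ⟨h1.symm, by simp [hc2]⟩).isInfix)
    · refine ih ?_ hi2
      rcases h with hYX | hnf
      · exact Or.inl hYX
      · exact Or.inr fun ht => hnf (pat_infix_cons.mpr (Or.inr ht))

def normL (l : List Char) : List Char :=
  rep2 'G' 'g' (rep2 'C' 'c' (rep2 'D' 'd' (rep2 'F' 'f' (rep2 'A' 'a' l))))

theorem normStr_toList (s : String) : (normStr s).toList = normL s.toList := by
  simp only [normStr, List.foldl, PySem.Str.toList_replace, normL]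
  rw [show ("A#" : String).toList = ['A','#'] from rfl, show ("a" : String).toList = ['a'] from rfl,
      show ("F#" : String).toList = ['F','#'] from rfl, show ("f" : String).toList = ['f'] from rfl,
      show ("D#" : String).toList = ['D','#'] from rfl, show ("d" : String).toList = ['d'] from rfl,
      show ("C#" : String).toList = ['C','#'] from rfl, show ("c" : String).toList = ['c'] from rfl,
      show ("G#" : String).toList = ['G','#'] from rfl, show ("g" : String).toList = ['g'] from rfl]
  simp only [replace_eq_rep2]

theorem guard_step (X x : Char) (pat flat s : String) (hp : pat.toList = [X, '#'])
    (hf : flat.toList = [x]) :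
    (if PySem.Str.isIn pat s then PySem.Str.replace s pat flat else s).toList = rep2 X x s.toList := by
  by_cases h : PySem.Str.isIn pat s
  · rw [if_pos h, PySem.Str.toList_replace, hp, hf, replace_eq_rep2]
  · rw [if_neg h]
    have hb : PySem.Chars.isIn pat.toList s.toList = false := by
      rw [← PySem.Str.isIn_eq]
      exact Bool.not_eq_true _ ▸ (by simpa using h)
    rw [hp] at hb
    exact (rep2_of_not_infix X x _ ((PySem.Chars.isIn_eq_false_iff _ _).mp hb)).symm

theorem changeStr_toList (s : String) : (changeStr s).toList = normL s.toList := by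
  simp only [changeStr, normL]
  rw [guard_step 'G' 'g' _ _ _ rfl rfl, guard_step 'C' 'c' _ _ _ rfl rfl,
      guard_step 'D' 'd' _ _ _ rfl rfl, guard_step 'F' 'f' _ _ _ rfl rfl,
      guard_step 'A' 'a' _ _ _ rfl rfl]

theorem normL_cleanA (l : List Char) : ¬ ['A','#'] <:+: normL l :=
  not_pat_infix_rep2 'G' 'g' 'A' (by decide) (by decide) _ (Or.inr <|
  not_pat_infix_rep2 'C' 'c' 'A' (by decide) (by decide) _ (Or.inr <|
  not_pat_infix_rep2 'D' 'd' 'A' (by decide) (by decide) _ (Or.inr <|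
  not_pat_infix_rep2 'F' 'f' 'A' (by decide) (by decide) _ (Or.inr <|
  not_pat_infix_rep2 'A' 'a' 'A' (by decide) (by decide) _ (Or.inl rfl)))))

theorem normL_cleanF (l : List Char) : ¬ ['F','#'] <:+: normL l :=
  not_pat_infix_rep2 'G' 'g' 'F' (by decide) (by decide) _ (Or.inr <|
  not_pat_infix_rep2 'C' 'c' 'F' (by decide) (by decide) _ (Or.inr <|
  not_pat_infix_rep2 'D' 'd' 'F' (by decide) (by decide) _ (Or.inr <|
  not_pat_infix_rep2 'F' 'f' 'F' (by decide) (by decide) _ (Or.inl rfl))))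

theorem normL_cleanD (l : List Char) : ¬ ['D','#'] <:+: normL l :=
  not_pat_infix_rep2 'G' 'g' 'D' (by decide) (by decide) _ (Or.inr <|
  not_pat_infix_rep2 'C' 'c' 'D' (by decide) (by decide) _ (Or.inr <|
  not_pat_infix_rep2 'D' 'd' 'D' (by decide) (by decide) _ (Or.inl rfl)))

theorem normL_cleanC (l : List Char) : ¬ ['C','#'] <:+: normL l :=
  not_pat_infix_rep2 'G' 'g' 'C' (by decide) (by decide) _ (Or.inr <|
  not_pat_infix_rep2 'C' 'c' 'C' (by decide) (by decide) _ (Or.inl rfl))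

theorem normL_cleanG (l : List Char) : ¬ ['G','#'] <:+: normL l :=
  not_pat_infix_rep2 'G' 'g' 'G' (by decide) (by decide) _ (Or.inl rfl)

theorem normL_idem (l : List Char) : normL (normL l) = normL l := by
  conv_lhs => rw [normL]
  rw [rep2_of_not_infix _ _ _ (normL_cleanA l), rep2_of_not_infix _ _ _ (normL_cleanF l),
      rep2_of_not_infix _ _ _ (normL_cleanD l), rep2_of_not_infix _ _ _ (normL_cleanC l),
      rep2_of_not_infix _ _ _ (normL_cleanG l)]

def gstep {α : Type} (before : α → α → Bool) (h : Option α) (x : α) : Option α :=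
  some (match h with | none => x | some y => if before x y then x else y)

theorem head?_insertBy {α : Type} (before : α → α → Bool) (x : α) (l : List α) :
    (PySem.List.insertBy before x l).head? = gstep before l.head? x := by
  cases l with
  | nil => simp [PySem.List.insertBy, gstep]
  | cons y ys =>
    by_cases h : before x y
    · simp [PySem.List.insertBy, gstep, h]
    · simp [PySem.List.insertBy, gstep, h]

theorem head?_foldl_insertBy {α : Type} (before : α → α → Bool) (xs : List α) :
    ∀ acc : List α,
    (List.foldl (fun acc x => PySem.List.insertBy before x acc) acc xs).head?
      = List.foldl (gstep before) acc.head? xs := by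
  induction xs with
  | nil => intro acc; rfl
  | cons x t ih =>
    intro acc
    simp only [List.foldl]
    rw [ih, head?_insertBy]

def ltKey (a b : Int × Int × String) : Bool :=
  decide ((-a.1 : Int) < -b.1) || (!decide ((-b.1 : Int) < -a.1) && decide (a.2.1 < b.2.1))

theorem head?_sorted2 (xs : List (Int × Int × String)) :
    (PySem.List.sorted2 xs (fun x => -x.1) (fun x => x.2.1) false).head?
      = List.foldl (gstep ltKey) none xs := by
  rw [show PySem.List.sorted2 xs (fun x => -x.1) (fun x => x.2.1) false
        = List.foldl (fun acc x => PySem.List.insertBy ltKey x acc) [] xs from rfl]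
  exact head?_foldl_insertBy ltKey xs []

theorem foldl_gstep_mem {α : Type} (before : α → α → Bool) (xs : List α) :
    ∀ (acc : Option α) (h : α), List.foldl (gstep before) acc xs = some h → h ∈ xs ∨ acc = some h := by
  induction xs with
  | nil => intro acc h hh; exact Or.inr hh
  | cons x t ih =>
    intro acc h hh
    rcases ih (gstep before acc x) h hh with hm | he
    · exact Or.inl (List.mem_cons_of_mem _ hm)
    · rcases acc with _ | y
      · simp [gstep] at he; exact Or.inl (he ▸ List.mem_cons_self)
      · by_cases hb : before x y
        · simp [gstep, hb] at he; exact Or.inl (he ▸ List.mem_cons_self)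
        · simp [gstep, hb] at he; exact Or.inr (by rw [he])

theorem slice2_getD0 (xs : List String) :
    (PySem.List.slice xs none (some 2)).getD 0 "" = PySem.List.pyGetD xs 0 "" := by
  rw [PySem.List.slice_to (xs := xs) (b := 2) (by norm_num), PySem.List.pyGetD_zero]
  cases xs <;> simp

theorem slice2_getD1 (xs : List String) :
    (PySem.List.slice xs none (some 2)).getD 1 "" = PySem.List.pyGetD xs 1 "" := by
  rw [PySem.List.slice_to (xs := xs) (b := 2) (by norm_num), PySem.List.pyGetD_ofNat']
  cases xs with
  | nil => simp
  | cons a t => cases t <;> simp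




def recMusic (info : String) : List String := (PySem.Str.split? info ",").getD []
def recStart (info : String) : List String :=
  (PySem.Str.split? (PySem.List.pyGetD (recMusic info) 0 "") ":").getD []
def recStop (info : String) : List String :=
  (PySem.Str.split? (PySem.List.pyGetD (recMusic info) 1 "") ":").getD []
def recTime (info : String) : Int :=
  ((PySem.Int.ofStr? (PySem.List.pyGetD (recStop info) 0 "")).getD 0 * 60
    + (PySem.Int.ofStr? (PySem.List.pyGetD (recStop info) 1 "")).getD 0)
  - ((PySem.Int.ofStr? (PySem.List.pyGetD (recStart info) 0 "")).getD 0 * 60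
    + (PySem.Int.ofStr? (PySem.List.pyGetD (recStart info) 1 "")).getD 0)
def recSheet (info : String) : List Char := normL (PySem.List.pyGetD (recMusic info) 3 "").toList
def recB (info : String) : List Char :=
  PySem.List.pyRepeat (recSheet info) (PySem.Int.floordiv (recTime info) (recSheet info).length)
    ++ PySem.Chars.slice (recSheet info) none (some (PySem.Int.mod (recTime info) (recSheet info).length))
def recTest (key info : String) : Bool := PySem.Chars.isIn key.toList (recB info)
def recTitle (info : String) : String := PySem.List.pyGetD (recMusic info) 2 ""

theorem harith (a b c d : Int) : (a - b) * 60 + c - d = a * 60 + c - (b * 60 + d) := by ring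

theorem stepA_align (key mcur : String) (hk : normL mcur.toList = key.toList) (info : String)
    (ans : List (Int × Int × String)) (idx : Int) :
    solStepA (ans, idx, mcur) info
      = ((if recTest key info then ans ++ [(recTime info, idx + 1, recTitle info)] else ans),
          idx + 1, changeStr mcur) := by
  simp only [solStepA, recTest, recB, recTime, recTitle, recSheet, recStart, recStop, recMusic,
    PySem.Str.len_eq, changeStr_toList, hk]
  split_ifs <;> rfl

theorem stepB_align (key : String) (info : String) (best : Option (Int × String)) :
    solStepB key best info =
      match best with
      | none => if recTest key info then some (recTime info, recTitle info) else none
      | some p =>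
          if recTest key info && decide (p.1 < recTime info) then some (recTime info, recTitle info)
          else some p := by
  cases best with
  | none =>
    simp only [solStepB, recTest, recB, recTime, recTitle, recSheet, recStart, recStop, recMusic,
      PySem.Str.len_eq, normStr_toList, slice2_getD0, slice2_getD1, harith]
  | some p =>
    simp only [solStepB, recTest, recB, recTime, recTitle, recSheet, recStart, recStop, recMusic,
      PySem.Str.len_eq, normStr_toList, slice2_getD0, slice2_getD1, harith]
    rfl

theorem loopEq (key : String) (hkey : normL key.toList = key.toList) :
    ∀ (infos : List String) (ans : List (Int × Int × String)) (idx : Int) (mcur : String)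
      (best : Option (Int × String)),
    normL mcur.toList = key.toList →
    (∀ e ∈ ans, e.2.1 ≤ idx) →
    (List.foldl (gstep ltKey) none ans).map (fun e => (e.1, e.2.2)) = best →
    (List.foldl (gstep ltKey) none (List.foldl solStepA (ans, idx, mcur) infos).1).map
        (fun e => (e.1, e.2.2))
      = List.foldl (solStepB key) best infos := by
  intro infos
  induction infos with
  | nil =>
    intro ans idx mcur best hk hidx hb
    simpa using hb
  | cons info rest ih =>
    intro ans idx mcur best hk hidx hb
    simp only [List.foldl]
    rw [stepA_align key mcur hk info ans idx, stepB_align key info best]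
    have hk' : normL (changeStr mcur).toList = key.toList := by
      rw [changeStr_toList, hk, hkey]
    by_cases ht : recTest key info
    · rw [if_pos ht]
      apply ih _ _ _ _ hk'
      · intro e he
        rcases List.mem_append.mp he with h1 | h2
        · have := hidx e h1; omega
        · have : e.2.1 = idx + 1 := by simp at h2; rw [h2]
          omega
      · rw [List.foldl_append]
        cases hG : List.foldl (gstep ltKey) none ans with
        | none =>
          rw [hG] at hb
          simp only [Option.map_none] at hb
          rw [← hb]
          simp [gstep, ht]
        | some h =>
          rw [hG] at hb
          simp only [Option.map_some] at hb
          rw [← hb]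
          have hmem : h ∈ ans := by
            rcases foldl_gstep_mem ltKey ans none h hG with hm | hc
            · exact hm
            · exact absurd hc (by simp)
          have hidxh : h.2.1 ≤ idx := hidx h hmem
          have hlt : ltKey (recTime info, idx + 1, recTitle info) h = decide (h.1 < recTime info) := by
            simp only [ltKey]
            have h2 : decide ((idx + 1 : Int) < h.2.1) = false := decide_eq_false (by omega)
            have h1 : decide ((-(recTime info) : Int) < -h.1) = decide (h.1 < recTime info) :=
              decide_eq_decide.mpr (by omega)
            rw [h1, h2]
            simp
          simp only [List.foldl, gstep, hlt, ht]
          by_cases hcmp : h.1 < recTime info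
          · simp [hcmp]
          · simp [hcmp]
    · rw [if_neg ht]
      apply ih _ _ _ _ hk' (fun e he => le_trans (hidx e he) (by omega))
      cases best with
      | none => simpa [ht] using hb
      | some p => simpa [ht] using hb

theorem final_eq (m : String) (infos : List String) : solution m infos = solution_alt m infos := by
  unfold solution solution_alt
  show (match PySem.List.sorted2 (List.foldl solStepA ([], 0, m) infos).1
          (fun x => -x.1) (fun x => x.2.1) false with
        | [] => "(None)"
        | e :: _ => e.2.2)
      = (match List.foldl (solStepB (normStr m)) none infos with
        | some b => b.2
        | none => "(None)")
  have hkey : normL (normStr m).toList = (normStr m).toList := by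
    rw [normStr_toList, normL_idem]
  have h := loopEq (normStr m) hkey infos [] 0 m none (by rw [normStr_toList]) (by simp) (by simp)
  cases hG : List.foldl (gstep ltKey) none (List.foldl solStepA ([], 0, m) infos).1 with
  | none =>
    rw [hG] at h
    simp only [Option.map_none] at h
    rw [← h]
    have hs : PySem.List.sorted2 (List.foldl solStepA ([], 0, m) infos).1
        (fun x => -x.1) (fun x => x.2.1) false = [] := by
      have hh := head?_sorted2 (List.foldl solStepA ([], 0, m) infos).1
      rw [hG] at hh
      exact List.head?_eq_none_iff.mp hh
    rw [hs]
  | some e =>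
    rw [hG] at h
    simp only [Option.map_some] at h
    rw [← h]
    have hh := head?_sorted2 (List.foldl solStepA ([], 0, m) infos).1
    rw [hG] at hh
    cases hsort : PySem.List.sorted2 (List.foldl solStepA ([], 0, m) infos).1
        (fun x => -x.1) (fun x => x.2.1) false with
    | nil => rw [hsort] at hh; simp at hh
    | cons e' t =>
      rw [hsort] at hh
      simp at hh
      rw [hh]

-- ===== VERDICT (by name: the statement is the Claim_ definition above) =====
theorem solution_spec : Claim_equal_solution := by
  intro m musicinfos _ _
  unfold Spec_solution
  exact final_eq m musicinfos
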